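-- pv_equiv track=rewrite | github.com/Marwane200/Foundation | BinarySearch.py | trueFalseSearch
-- ===== SOURCE A (Python) =====
-- def trueFalseSearch(arr):
--     left = 0
--     right = len(arr) - 1
--     i = -1
--     while left <= right:
--         mid = (left + right )//2
--         if arr[mid]:
--             i = mid
--             left = mid + 1
--         else:
--             right = mid - 1
--     return i
-- ===== SOURCE B (Python) =====
-- def trueFalseSearch(arr):
--     # Recursion on the current segment (a slice) with an offset, instead of
--     # index arithmetic on the whole array; same probe path as the index form.
--     def go(seg, off, best):
--         if not seg:
--             return best
--         m = (len(seg) - 1) // 2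
--         if seg[m]:
--             return go(seg[m + 1:], off + m + 1, off + m)
--         return go(seg[:m], off, best)
--     return go(arr, 0, -1)
-- ===== Notes on version B (the rewrite author's own statement) =====
-- stated objective: alternative
-- what changed: The index-based while loop over (left, right) is replaced by a recursion on list segments (slices) with an offset accumulator, so no absolute index bookkeeping remains; the probe path is identical.
import Mathlib
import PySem

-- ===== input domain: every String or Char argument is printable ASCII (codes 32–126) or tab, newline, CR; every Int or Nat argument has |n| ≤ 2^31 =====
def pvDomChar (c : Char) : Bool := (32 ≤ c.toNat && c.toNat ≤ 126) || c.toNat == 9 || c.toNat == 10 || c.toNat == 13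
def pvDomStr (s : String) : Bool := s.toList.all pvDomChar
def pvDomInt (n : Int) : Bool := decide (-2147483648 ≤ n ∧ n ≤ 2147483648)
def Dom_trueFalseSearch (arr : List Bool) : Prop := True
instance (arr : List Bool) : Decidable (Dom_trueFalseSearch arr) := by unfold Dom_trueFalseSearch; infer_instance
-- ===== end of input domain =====

-- B re-decomposes A's index-based while loop as a recursion on list segments
-- (slices) with an offset accumulator; same probe path, objective: alternative.

-- ===== PORT A =====
-- the while loop of A, state (left, right, i)
def trueFalseSearchLoop (arr : List Bool) (left right i : Int) : Int :=
  if h : left ≤ right then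
    let mid := PySem.Int.floordiv (left + right) 2
    match PySem.List.pyGet? arr mid with
    | some b =>
      if b then trueFalseSearchLoop arr (mid + 1) right mid
      else trueFalseSearchLoop arr left (mid - 1) i
    | none => i  -- IndexError; unreachable from the initial state of trueFalseSearch
  else i
termination_by (right + 1 - left).toNat
decreasing_by
  · have hb := PySem.Int.floordiv_two_mid_bounds h
    omega
  · have hb := PySem.Int.floordiv_two_mid_bounds h
    omega

def trueFalseSearch (arr : List Bool) : Int :=
  trueFalseSearchLoop arr 0 ((arr.length : Int) - 1) (-1)

-- ===== PORT B =====
-- the inner helper go(seg, off, best) of Source B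
def trueFalseSearchGo (seg : List Bool) (off best : Int) : Int :=
  if hseg : seg = [] then best
  else
    let m : Nat := (seg.length - 1) / 2
    -- seg[m]: m < seg.length always, so getD is exact
    if seg.getD m false then
      trueFalseSearchGo (seg.drop (m + 1)) (off + (m : Int) + 1) (off + (m : Int))
    else
      trueFalseSearchGo (seg.take m) off best
termination_by seg.length
decreasing_by
  · have h1 : seg.length ≠ 0 := by simpa using hseg
    simp only [List.length_drop]
    omega
  · have h1 : seg.length ≠ 0 := by simpa using hseg
    simp only [List.length_take]
    omega

def trueFalseSearch_alt (arr : List Bool) : Int :=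
  trueFalseSearchGo arr 0 (-1)

-- ===== PRECONDITION & SPEC =====
def Spec_trueFalseSearch (arr : List Bool) (out : Int) : Prop := out = trueFalseSearch_alt arr
instance (arr : List Bool) (out : Int) : Decidable (Spec_trueFalseSearch arr out) := by unfold Spec_trueFalseSearch; infer_instance

-- ===== CLAIM (what is proved, stated in full; the proofs are below) =====
def Claim_equal_trueFalseSearch : Prop := ∀ (arr : List Bool), Dom_trueFalseSearch arr → Spec_trueFalseSearch arr (trueFalseSearch arr)

-- ===== LEMMAS AND PROOFS =====

-- Invariant: the loop on interval [lo, hi] equals go on the segment arr[lo .. hi]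
-- with offset lo, where n = hi + 1 - lo is the segment length.
lemma loop_eq_go (n : Nat) : ∀ (arr : List Bool) (lo hi i : Int),
    0 ≤ lo → hi < (arr.length : Int) → (hi + 1 - lo).toNat = n →
    trueFalseSearchLoop arr lo hi i =
      trueFalseSearchGo ((arr.drop lo.toNat).take n) lo i := by
  induction n using Nat.strong_induction_on with
  | _ n ih =>
    intro arr lo hi i h0 hlen hn
    by_cases hle : lo ≤ hi
    · -- non-empty interval
      have hn1 : 1 ≤ n := by omega
      have hseglen : ((arr.drop lo.toNat).take n).length = n := by
        simp [List.length_take, List.length_drop]; omega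
      set m : Nat := (n - 1) / 2 with hm
      have hmid : PySem.Int.floordiv (lo + hi) 2 = lo + (m : Int) := by
        rw [PySem.Int.floordiv_eq_ediv_of_pos (by omega)]
        omega
      have hmn : m < n := by omega
      have hidx : lo.toNat + m < arr.length := by omega
      have hisEmp : ((arr.drop lo.toNat).take n) ≠ [] := by
        intro hc; rw [hc] at hseglen; simp at hseglen; omega
      have hmseg : (((arr.drop lo.toNat).take n).length - 1) / 2 = m := by
        rw [hseglen]
      have hgetD : ((arr.drop lo.toNat).take n).getD m false = arr[(lo + (m : Int)).toNat] := by
        rw [List.getD_eq_getElem _ _ (by omega)]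
        simp only [List.getElem_take, List.getElem_drop]
        congr 1
        omega
      rw [trueFalseSearchLoop, trueFalseSearchGo]
      rw [dif_pos hle, dif_neg hisEmp]
      simp only [hmid]
      rw [PySem.List.pyGet?_eq_some_getElem arr (by omega) (by omega)]
      simp only [hseglen, ← hm, hgetD]
      by_cases hb : arr[(lo + (m : Int)).toNat] = true
      · simp only [if_pos hb]
        rw [ih (n - (m + 1)) (by omega) arr (lo + (m : Int) + 1) hi (lo + (m : Int))
              (by omega) hlen (by omega)]
        rw [List.drop_take, List.drop_drop]
        have hidx2 : (lo + (m : Int) + 1).toNat = lo.toNat + (m + 1) := by omega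
        rw [hidx2]
      · simp only [if_neg hb]
        rw [ih m hmn arr lo (lo + (m : Int) - 1) i h0 (by omega) (by omega)]
        rw [List.take_take, Nat.min_eq_left (Nat.le_of_lt hmn)]
    · -- empty interval: both sides return the accumulator
      have hn0 : n = 0 := by omega
      rw [trueFalseSearchLoop, trueFalseSearchGo]
      rw [dif_neg hle, dif_pos (by simp [hn0])]

-- ===== VERDICT (by name: the statement is the Claim_ definition above) =====
theorem trueFalseSearch_spec : Claim_equal_trueFalseSearch := by
  intro arr _
  unfold Spec_trueFalseSearch trueFalseSearch trueFalseSearch_alt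
  rw [loop_eq_go arr.length arr 0 ((arr.length : Int) - 1) (-1) (by omega) (by omega) (by omega)]
  simp
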